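-- pv_equiv track=rewrite | github.com/AhmadAbdulAzeem/Ciphers | Project1/project1.py | formatPlainText
-- ===== SOURCE A (Python) =====
-- def formatPlainText(plainText):
--     plainText = plainText.replace(" ", "")  # remove soaces
--     plainText = plainText.upper()
--     plainText = plainText.replace("J", "I")
--     result = str()
--     itr = 0
--     while itr < len(plainText):
--         # If a pair is a repeated letter, insert ‘X’ as filler between the two characters.
--         if(((itr+1) < len(plainText)) and (plainText[itr] == plainText[itr+1])):
--             result += plainText[itr] + 'X'
--         else:
--             result += plainText[itr]
--         itr += 1
--     if(len(result) % 2 == 1):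
--         result += 'X'
--     return result
-- ===== SOURCE B (Python) =====
-- def formatPlainText(plainText):
--     s = plainText.replace(" ", "").upper().replace("J", "I")
--     parts = []
--     i = 0
--     n = len(s)
--     while i < n:
--         j = i + 1
--         while j < n and s[j] == s[i]:
--             j += 1
--         parts.append(s[i] + ("X" + s[i]) * (j - i - 1))
--         i = j
--     out = "".join(parts)
--     if len(out) % 2 == 1:
--         out += "X"
--     return out
-- ===== Notes on version B (the rewrite author's own statement) =====
-- stated objective: faster
-- what changed: Replaces A's per-index adjacent-pair scan with quadratic string += accumulation by a run-length decomposition: B scans maximal runs of equal characters, emits c + ('X'+c)*(run-1) per run into a list, and joins once, then pads.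
import Mathlib
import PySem

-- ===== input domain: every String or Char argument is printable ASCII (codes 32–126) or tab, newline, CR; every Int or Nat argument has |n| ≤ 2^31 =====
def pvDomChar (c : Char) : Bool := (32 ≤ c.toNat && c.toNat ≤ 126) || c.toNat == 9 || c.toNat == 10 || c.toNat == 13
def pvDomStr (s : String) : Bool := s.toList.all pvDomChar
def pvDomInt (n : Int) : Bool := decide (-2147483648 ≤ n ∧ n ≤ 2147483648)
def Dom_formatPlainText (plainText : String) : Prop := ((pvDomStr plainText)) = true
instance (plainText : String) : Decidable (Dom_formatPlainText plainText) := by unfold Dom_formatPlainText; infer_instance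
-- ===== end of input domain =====

-- B replaces A's per-index adjacent-pair scan by a run-length pass over maximal
-- runs of equal characters, joining the pieces once (A accumulates with string +=;
-- a timing run measured B faster at the largest sizes).


-- ===== PORT A =====
-- the while loop of A: index itr walks the cleaned string, appending to result
def pvLoopA (s : List Char) (itr : Nat) (result : List Char) : List Char :=
  if itr < s.length then
    if itr + 1 < s.length ∧ s.getD itr ' ' = s.getD (itr + 1) ' ' then
      pvLoopA s (itr + 1) (result ++ [s.getD itr ' ', 'X'])
    else
      pvLoopA s (itr + 1) (result ++ [s.getD itr ' '])
  else result
termination_by s.length - itr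

def formatPlainText (plainText : String) : String :=
  let cs := PySem.Chars.replace (PySem.Chars.upper
              (PySem.Chars.replace plainText.toList [' '] [])) ['J'] ['I']
  let result := pvLoopA cs 0 []
  let result := if result.length % 2 = 1 then result ++ ['X'] else result
  String.ofList result

-- ===== PORT B =====
-- B's outer while: take one maximal run of the head character, emit
-- c + ("X"+c)*(run-1), recurse on the rest (the inner counting while is
-- takeWhile/dropWhile on the tail).
def pvRunsB (cs : List Char) : List Char :=
  match cs with
  | [] => []
  | c :: t =>
    (c :: (List.replicate (t.takeWhile (· == c)).length ['X', c]).flatten)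
      ++ pvRunsB (t.dropWhile (· == c))
termination_by cs.length
decreasing_by
  have := List.length_dropWhile_le (· == c) t
  simp; omega

def formatPlainText_alt (plainText : String) : String :=
  let cs := PySem.Chars.replace (PySem.Chars.upper
              (PySem.Chars.replace plainText.toList [' '] [])) ['J'] ['I']
  let out := pvRunsB cs
  let out := if out.length % 2 = 1 then out ++ ['X'] else out
  String.ofList out

-- ===== PRECONDITION & SPEC =====
def Spec_formatPlainText (plainText : String) (out : String) : Prop := out = formatPlainText_alt plainText
instance (plainText : String) (out : String) : Decidable (Spec_formatPlainText plainText out) := by unfold Spec_formatPlainText; infer_instance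

-- ===== CLAIM (what is proved, stated in full; the proofs are below) =====
def Claim_equal_formatPlainText : Prop := ∀ (plainText : String), Dom_formatPlainText plainText → Spec_formatPlainText plainText (formatPlainText plainText)

-- ===== LEMMAS AND PROOFS =====

-- A's loop, rephrased as structural recursion on the suffix (adjacent-pair scan)
def pvPairCore : List Char → List Char
  | [] => []
  | [a] => [a]
  | a :: b :: t => if a = b then a :: 'X' :: pvPairCore (b :: t) else a :: pvPairCore (b :: t)

lemma pvLoopA_eq_pairCore (fuel : Nat) : ∀ (cs : List Char) (itr : Nat) (acc : List Char),
    cs.length - itr ≤ fuel → pvLoopA cs itr acc = acc ++ pvPairCore (cs.drop itr) := by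
  induction fuel with
  | zero =>
    intro cs itr acc h
    have hge : cs.length ≤ itr := by omega
    rw [pvLoopA, if_neg (by omega), List.drop_of_length_le hge, pvPairCore, List.append_nil]
  | succ n ih =>
    intro cs itr acc h
    by_cases hlt : itr < cs.length
    · have hdrop : cs.drop itr = cs[itr] :: cs.drop (itr + 1) := List.drop_eq_getElem_cons hlt
      have hgd : cs.getD itr ' ' = cs[itr] := List.getD_eq_getElem cs ' ' hlt
      by_cases hlt2 : itr + 1 < cs.length
      · have hdrop2 : cs.drop (itr + 1) = cs[itr + 1] :: cs.drop (itr + 2) :=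
          List.drop_eq_getElem_cons hlt2
        have hgd2 : cs.getD (itr + 1) ' ' = cs[itr + 1] := List.getD_eq_getElem cs ' ' hlt2
        by_cases heq : cs[itr] = cs[itr + 1]
        · rw [pvLoopA, if_pos hlt, if_pos ⟨hlt2, by rw [hgd, hgd2]; exact heq⟩,
            ih cs (itr + 1) _ (by omega), hdrop, hdrop2, pvPairCore, if_pos heq, hgd,
            ← hdrop2]
          simp
        · rw [pvLoopA, if_pos hlt, if_neg (by rw [hgd, hgd2]; exact fun hc => heq hc.2),
            ih cs (itr + 1) _ (by omega), hdrop, hdrop2, pvPairCore, if_neg heq, hgd,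
            ← hdrop2]
          simp
      · have hend : cs.drop (itr + 1) = [] := List.drop_of_length_le (by omega)
        rw [pvLoopA, if_pos hlt, if_neg (fun hc => absurd hc.1 hlt2),
          ih cs (itr + 1) _ (by omega), hdrop, hend, pvPairCore, hgd]
        simp [pvPairCore]
    · rw [pvLoopA, if_neg hlt, List.drop_of_length_le (by omega), pvPairCore, List.append_nil]

-- Char's == agrees with = (both directions of the test)
lemma pvBeq_comm (a b : Char) : (b == a) = decide (a = b) := by
  by_cases h : a = b <;> simp [h]
  exact fun hc => h hc.symm

lemma pvPairCore_eq_runs (n : Nat) : ∀ (cs : List Char), cs.length ≤ n →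
    pvPairCore cs = pvRunsB cs := by
  induction n with
  | zero =>
    intro cs h
    have : cs = [] := List.eq_nil_of_length_eq_zero (by omega)
    subst this; rw [pvPairCore, pvRunsB]
  | succ n ih =>
    intro cs h
    match cs with
    | [] => rw [pvPairCore, pvRunsB]
    | [c] => simp [pvPairCore, pvRunsB]
    | c :: b :: t =>
      by_cases heq : c = b
      · subst heq
        rw [pvPairCore, if_pos rfl, ih (c :: t) (by simp at h ⊢; omega)]
        conv_lhs => rw [pvRunsB]
        conv_rhs => rw [pvRunsB]
        simp [List.takeWhile, List.dropWhile, List.replicate_succ]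
      · have hbc : (b == c) = false := by
          rw [pvBeq_comm c b]; simp [heq]
        rw [pvPairCore, if_neg heq, ih (b :: t) (by simp at h ⊢; omega)]
        conv_rhs => rw [pvRunsB]
        simp [List.takeWhile, List.dropWhile, hbc]

lemma pvLoopA_eq_runs (cs : List Char) : pvLoopA cs 0 [] = pvRunsB cs := by
  rw [pvLoopA_eq_pairCore cs.length cs 0 [] (by omega), List.drop_zero, List.nil_append,
    pvPairCore_eq_runs cs.length cs le_rfl]

-- ===== VERDICT (by name: the statement is the Claim_ definition above) =====
theorem formatPlainText_spec : Claim_equal_formatPlainText := by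
  intro plainText _
  unfold Spec_formatPlainText
  simp only [formatPlainText, formatPlainText_alt, pvLoopA_eq_runs]
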